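-- pv_equiv track=rewrite | github.com/olivia-rippee/Python-for-Computational-Biology-and-Bioinformatics | Bioinformatics VI - Finding Mutations in DNA and Proteins/3 Speeding Up Burrows-Wheeler Read Mapping.py | MultiplePatternMatching
-- ===== SOURCE A (Python) =====
-- def MultiplePatternMatching(text, patterns):
--     '''Identify all occurrences of multiple pattern strings within a given text. It is designed to
--     efficiently search for many short patterns (e.g., DNA reads) within a large string (e.g., genome),
--     using a memory-efficient version of the BetterBWMatching algorithm with checkpoint arrays.
--
--     Input: A string Text followed by a space-separated collection of strings Patterns.
--     Output: For each string Pattern in Patterns, the string Pattern followed by a colon, followed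
--     by a space-separated list of all starting positions in Text where Pattern appears as a substring.'''
--
--     bwt, suffix_array = BuildBWT(text)
--     C = 100  # checkpoint interval
--     first_occurrence = BuildFirstOccurrence(bwt)
--     checkpoints, _ = BuildCheckpointArrays(bwt, C)
--
--     results = {}
--     for pattern in patterns:
--         match_positions = BetterBWMatching(bwt, pattern, first_occurrence, C, checkpoints)
--         results[pattern] = sorted([suffix_array[i] for i in match_positions])
--     return results
--
-- def BetterBWMatching(bwt, pattern, first_occurrence, C, checkpoints):
--     top = 0
--     bottom = len(bwt) - 1
--
--     while top <= bottom:
--         if pattern: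
--             symbol = pattern[-1]
--             pattern = pattern[:-1]
--             if symbol in bwt[top:bottom + 1]:
--                 top = first_occurrence[symbol] + CountSymbol(bwt, symbol, top, C, checkpoints)
--                 bottom = first_occurrence[symbol] + CountSymbol(bwt, symbol, bottom + 1, C, checkpoints) - 1
--             else:
--                 return []
--         else:
--             return list(range(top, bottom + 1))
--     return []
--
-- def BuildBWT(Text):
--     Text += "$"
--     Suffixes = [(Text[i:], i) for i in range(len(Text))]
--     Suffixes.sort()
--     BWT = ''.join(Text[i - 1] if i > 0 else '$' for (_, i) in Suffixes)
--     SuffixArray = [i for (_, i) in Suffixes]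
--     return BWT, SuffixArray
--
-- def BuildFirstOccurrence(BWT):
--     FirstCol = sorted(BWT)
--     FirstOccurrence = {}
--     for i, char in enumerate(FirstCol):
--         if char not in FirstOccurrence:
--             FirstOccurrence[char] = i
--     return FirstOccurrence
--
-- def BuildCheckpointArrays(BWT, C):
--     Counts = {}
--     Total = {}
--     for char in set(BWT):
--         Total[char] = 0
--         Counts[char] = []
--     for i in range(len(BWT)):
--         if i % C == 0:
--             for char in Total:
--                 Counts[char].append(Total[char])
--         Total[BWT[i]] += 1
--     return Counts, Total
--
-- def CountSymbol(BWT, Symbol, Pos, C, Checkpoints):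
--     CheckpointIndex = Pos // C
--     Count = Checkpoints[Symbol][CheckpointIndex]
--     Start = CheckpointIndex * C
--     for i in range(Start, Pos):
--         if BWT[i] == Symbol:
--             Count += 1
--     return Count
-- ===== SOURCE B (Python) =====
-- def MultiplePatternMatching(text, patterns):
--     '''Same output as A: dict mapping each pattern to the sorted list of its
--     start positions in text (BWT backward search).  Restructured: suffix array
--     by sorting indices with a suffix key (no materialised (suffix, index)
--     pairs), first-occurrence column by counting smaller symbols, occurrence
--     counts by full per-symbol cumulative rank rows (no checkpoint arrays, no
--     residual scan), and the matcher is a fold over the reversed pattern with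
--     an exclusive bottom bound.'''
--     t = text + "$"
--     n = len(t)
--     sa = sorted(range(n), key=lambda i: t[i:])
--     bwt = [t[i - 1] for i in sa]  # i = 0 wraps to t[-1] == '$'
--     alphabet = set(bwt)
--     first = {c: sum(1 for x in bwt if x < c) for c in alphabet}
--     ranks = {}
--     for c in alphabet:
--         row = [0]
--         cnt = 0
--         for x in bwt:
--             if x == c:
--                 cnt += 1
--             row.append(cnt)
--         ranks[c] = row
--
--     results = {}
--     for pattern in patterns:
--         top, bot = 0, n  # bot is exclusive
--         for c in reversed(pattern):
--             if c not in first: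
--                 top, bot = 0, 0
--                 break
--             row = ranks[c]
--             top = first[c] + row[top]
--             bot = first[c] + row[bot]
--             if top >= bot:
--                 break
--         results[pattern] = sorted(sa[k] for k in range(top, bot))
--     return results
-- ===== Notes on version B (the rewrite author's own statement) =====
-- stated objective: simpler
-- what changed: B drops A's checkpoint-array machinery entirely: the suffix array is built by sorting indices with a suffix key instead of sorting (suffix, index) pairs, the first-occurrence column is computed by counting strictly smaller symbols instead of scanning an enumerated sorted column, occurrence counts are direct prefix counts instead of checkpoint lookups plus a residual scan, and the matcher is a fold over the reversed pattern with an exclusive bottom bound instead of a while loop that slices the pattern and membership-tests a slice of the BWT.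
import Mathlib
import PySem

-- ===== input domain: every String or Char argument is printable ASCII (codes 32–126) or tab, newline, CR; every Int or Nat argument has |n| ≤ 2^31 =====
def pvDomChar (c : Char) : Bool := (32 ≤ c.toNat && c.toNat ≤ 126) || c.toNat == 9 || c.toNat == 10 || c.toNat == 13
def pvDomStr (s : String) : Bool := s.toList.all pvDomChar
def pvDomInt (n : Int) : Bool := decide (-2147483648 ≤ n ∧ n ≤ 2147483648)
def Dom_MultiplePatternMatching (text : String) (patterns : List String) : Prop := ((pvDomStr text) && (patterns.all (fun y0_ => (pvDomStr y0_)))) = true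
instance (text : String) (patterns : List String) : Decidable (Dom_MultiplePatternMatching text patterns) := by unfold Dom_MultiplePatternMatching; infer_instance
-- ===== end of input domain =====

-- B replaces A's checkpointed BWT machinery by a plainly simpler exact pipeline: suffix array by
-- sorting indices with a suffix key, first-occurrence by counting smaller symbols, occurrence
-- counts by per-symbol cumulative rank rows, and a fold over the reversed pattern (same values).


-- ===== PORT A =====
def pvCountSymbol (bwt : List Char) (symbol : Char) (pos : Int) (C : Int)
    (chk : PySem.Dict Char (List Int)) : Int :=
  let ci := PySem.Int.floordiv pos C
  -- Checkpoints[Symbol][CheckpointIndex]: Python raises KeyError/IndexError where the lookups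
  -- fail; the defaults are only reached outside Pre_ (where A raises)
  let count := PySem.List.pyGetD (chk.getD symbol []) ci 0
  let start := ci * C
  (PySem.List.pyRange start pos 1).foldl
    (fun cnt i => if PySem.List.pyGetD bwt i ' ' = symbol then cnt + 1 else cnt) count

def pvBuildBWT (textC : List Char) : List Char × List Int :=
  let t := textC ++ ['$']
  let n : Int := PySem.List.len t
  let suffixes := (PySem.List.pyRange 0 n 1).map (fun i => (PySem.List.slice t (some i) none, i))
  -- Python sorts the (suffix, index) pairs by tuple order = lexicographic product order
  let sorted := PySem.List.sorted suffixes (fun p => toLex p)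
  -- Text[i - 1] is in range whenever i > 0, so the default is never reached
  let bwt := sorted.map (fun p => if p.2 > 0 then PySem.List.pyGetD t (p.2 - 1) '$' else '$')
  let sa := sorted.map (fun p => p.2)
  (bwt, sa)

def pvBuildFirstOccurrence (bwt : List Char) : PySem.Dict Char Int :=
  let firstCol := PySem.List.sorted bwt (fun c => c)
  (PySem.List.enumerate firstCol 0).foldl
    (fun d p => if d.contains p.2 then d else d.insert p.2 p.1) PySem.Dict.empty

def pvBuildCheckpointArrays (bwt : List Char) (C : Int) :
    PySem.Dict Char (List Int) × PySem.Dict Char Int :=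
  let init : PySem.Dict Char (List Int) × PySem.Dict Char Int :=
    (PySem.Set.ofList bwt).foldl
      (fun p c => (p.1.insert c [], p.2.insert c 0)) (PySem.Dict.empty, PySem.Dict.empty)
  (PySem.List.pyRange 0 (PySem.List.len bwt) 1).foldl
    (fun p i =>
      let p1 := if PySem.Int.mod i C = 0 then
          (p.2.keys.foldl (fun cnts c => cnts.insert c (cnts.getD c [] ++ [p.2.getD c 0])) p.1, p.2)
        else p
      -- Total[BWT[i]] += 1: the key is always present, BWT[i] always in range
      (p1.1, p1.2.modify (PySem.List.pyGetD bwt i ' ') 0 (· + 1)))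
    init

def pvBetterBWMatching (bwt : List Char) (fo : PySem.Dict Char Int) (C : Int)
    (chk : PySem.Dict Char (List Int)) (pattern : List Char) (top bottom : Int) : List Int :=
  if top ≤ bottom then
    if h : pattern = [] then PySem.List.pyRange top (bottom + 1) 1
    else
      let symbol := pattern.getLast h
      let pat' := pattern.dropLast
      -- 'symbol in bwt[top:bottom+1]': membership of the single character in the slice
      if (PySem.List.slice bwt (some top) (some (bottom + 1))).contains symbol then
        pvBetterBWMatching bwt fo C chk pat'
          (fo.getD symbol 0 + pvCountSymbol bwt symbol top C chk)
          (fo.getD symbol 0 + pvCountSymbol bwt symbol (bottom + 1) C chk - 1)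
      else []
  else []
termination_by pattern.length
decreasing_by
  have h' : 0 < pattern.length := List.length_pos_iff.mpr h
  simpa [List.length_dropLast] using Nat.sub_lt h' Nat.one_pos

def MultiplePatternMatching (text : String) (patterns : List String) : List (String × List Int) :=
  let bs := pvBuildBWT text.toList
  let bwt := bs.1
  let sa := bs.2
  let C : Int := 100
  let fo := pvBuildFirstOccurrence bwt
  let chk := (pvBuildCheckpointArrays bwt C).1
  (patterns.foldl (fun (d : PySem.Dict String (List Int)) pattern =>
      let mp := pvBetterBWMatching bwt fo C chk pattern.toList 0 (PySem.List.len bwt - 1)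
      -- suffix_array[i] is always in range for the returned match positions
      d.insert pattern
        (PySem.List.sorted (mp.map (fun i => PySem.List.pyGetD sa i 0)) (fun x => x)))
    PySem.Dict.empty).items

-- ===== PORT B =====
def pvAltLoop (first : PySem.Dict Char Int) (ranks : PySem.Dict Char (List Int)) :
    List Char → Int → Int → Int × Int
  | [], top, bot => (top, bot)
  | c :: rest, top, bot =>
    if first.contains c then
      -- ranks[c] is present whenever c is in first (same key set); row[top]/row[bot]
      -- are always in range (0 ≤ top ≤ bot ≤ n, rows have n+1 entries)
      let row := ranks.getD c []
      let f := first.getD c 0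
      let top' := f + PySem.List.pyGetD row top 0
      let bot' := f + PySem.List.pyGetD row bot 0
      if bot' ≤ top' then (top', bot') else pvAltLoop first ranks rest top' bot'
    else (0, 0)

def MultiplePatternMatching_alt (text : String) (patterns : List String) : List (String × List Int) :=
  let t := text.toList ++ ['$']
  let n : Int := PySem.List.len t
  let sa := PySem.List.sorted (PySem.List.pyRange 0 n 1) (fun i => PySem.List.slice t (some i) none)
  let bwt := sa.map (fun i => PySem.List.pyGetD t (i - 1) '$')
  let first := (PySem.Set.ofList bwt).foldl
    (fun (d : PySem.Dict Char Int) c => d.insert c ((bwt.countP (fun x => decide (x < c)) : Int)))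
    PySem.Dict.empty
  let ranks := (PySem.Set.ofList bwt).foldl
    (fun (d : PySem.Dict Char (List Int)) c =>
      d.insert c (bwt.foldl
        (fun (p : List Int × Int) x =>
          let cnt := if x = c then p.2 + 1 else p.2
          (p.1 ++ [cnt], cnt)) ([0], 0)).1)
    PySem.Dict.empty
  (patterns.foldl (fun (d : PySem.Dict String (List Int)) pattern =>
      let tb := pvAltLoop first ranks pattern.toList.reverse 0 n
      d.insert pattern
        (PySem.List.sorted ((PySem.List.pyRange tb.1 tb.2 1).map (fun k => PySem.List.pyGetD sa k 0)) (fun x => x)))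
    PySem.Dict.empty).items

-- ===== PRECONDITION & SPEC =====
-- Pre_ excludes exactly the inputs where A raises an IndexError: len(text+'$') a multiple of the
-- checkpoint interval 100 together with some nonempty pattern whose last character occurs in
-- text+'$' (the first backward-search step then reads one checkpoint past the end).
def Pre_MultiplePatternMatching (text : String) (patterns : List String) : Prop :=
  (text.toList.length + 1) % 100 = 0 →
    ∀ p ∈ patterns, ∀ c, p.toList.getLast? = some c → c ∉ (text.toList ++ ['$'])
instance (text : String) (patterns : List String) : Decidable (Pre_MultiplePatternMatching text patterns) := by
  unfold Pre_MultiplePatternMatching; infer_instance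
def pvWitness_MultiplePatternMatching : String × List String := ("panamabananas", ["ana", "as"])

def Spec_MultiplePatternMatching (text : String) (patterns : List String) (out : List (String × List Int)) : Prop := out = MultiplePatternMatching_alt text patterns
instance (text : String) (patterns : List String) (out : List (String × List Int)) : Decidable (Spec_MultiplePatternMatching text patterns out) := by unfold Spec_MultiplePatternMatching; infer_instance

-- ===== CLAIM (what is proved, stated in full; the proofs are below) =====
def Claim_equal_MultiplePatternMatching : Prop := ∀ (text : String) (patterns : List String), Dom_MultiplePatternMatching text patterns → Pre_MultiplePatternMatching text patterns → Spec_MultiplePatternMatching text patterns (MultiplePatternMatching text patterns)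

-- ===== LEMMAS AND PROOFS =====

-- proof-side shorthands for B's pipeline pieces (definitionally the terms inside the ports)
def pvSufKey (t : List Char) (i : Int) : List Char := PySem.List.slice t (some i) none
def pvSA (t : List Char) : List Int :=
  PySem.List.sorted (PySem.List.pyRange 0 (PySem.List.len t) 1) (pvSufKey t)
def pvBW (t : List Char) : List Char := (pvSA t).map (fun i => PySem.List.pyGetD t (i - 1) '$')
def pvAltFirst (bwt : List Char) : PySem.Dict Char Int :=
  (PySem.Set.ofList bwt).foldl
    (fun (d : PySem.Dict Char Int) c => d.insert c ((bwt.countP (fun x => decide (x < c)) : Int)))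
    PySem.Dict.empty
def pvAltRow (bwt : List Char) (c : Char) : List Int :=
  (bwt.foldl
    (fun (p : List Int × Int) x =>
      let cnt := if x = c then p.2 + 1 else p.2
      (p.1 ++ [cnt], cnt)) ([0], 0)).1
def pvAltRanks (bwt : List Char) : PySem.Dict Char (List Int) :=
  (PySem.Set.ofList bwt).foldl
    (fun (d : PySem.Dict Char (List Int)) c => d.insert c (pvAltRow bwt c)) PySem.Dict.empty
def pvCntLt (bwt : List Char) (c : Char) : Int := (bwt.countP (fun x => decide (x < c)) : Int)
def pvOccN (bwt : List Char) (c : Char) (m : Nat) : Int := (((bwt.take m).count c : Nat) : Int)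

-- Python's sorted uses one Decidable instance, the Mathlib order lemmas another; they agree.
theorem pvSortedInst {α κ : Type} [LT κ] (d1 d2 : DecidableLT κ) (xs : List α) (key : α → κ) (rev : Bool) :
    @PySem.List.sorted α κ _ d1 xs key rev = @PySem.List.sorted α κ _ d2 xs key rev := by
  have : d1 = d2 := by funext a b; exact Subsingleton.elim _ _
  rw [this]

theorem pvSorted_pairwise {α κ : Type} [LinearOrder κ] (d : DecidableLT κ) (xs : List α) (key : α → κ) :
    (@PySem.List.sorted α κ _ d xs key false).Pairwise (fun a b => key a ≤ key b) := by
  have h := PySem.List.sorted_pairwise xs key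
  rwa [pvSortedInst _ d] at h

theorem pvSorted_eq_of_perm_of_pairwise_lt {α κ : Type} [LinearOrder κ] (d : DecidableLT κ)
    (xs ys : List α) (key : α → κ) (hp : ys.Perm xs)
    (hpw : ys.Pairwise (fun a b => key a < key b)) :
    @PySem.List.sorted α κ _ d xs key false = ys := by
  have h := PySem.List.sorted_eq_of_perm_of_pairwise_lt xs ys key hp hpw
  rwa [pvSortedInst _ d] at h

theorem pvSA_perm (t : List Char) : (pvSA t).Perm (PySem.List.pyRange 0 (PySem.List.len t) 1) :=
  PySem.List.sorted_perm _ _ _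

theorem pvSA_mem {t : List Char} {i : Int} (h : i ∈ pvSA t) : 0 ≤ i ∧ i < t.length := by
  have h2 := (PySem.List.mem_sorted _ _ _ _).1 h
  have h3 := PySem.List.mem_pyRange_one.1 h2
  simpa [PySem.List.len_eq] using h3

theorem pvSA_nodup (t : List Char) : (pvSA t).Nodup :=
  ((pvSA_perm t).nodup_iff).2 (PySem.List.nodup_pyRange_one _ _)

theorem pvSA_length (t : List Char) : (pvSA t).length = t.length := by
  simp [pvSA, PySem.List.length_sorted, PySem.List.length_pyRange_one]

theorem pvBW_length (t : List Char) : (pvBW t).length = t.length := by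
  simp [pvBW, pvSA_length]

theorem pvSufKey_length {t : List Char} {i : Int} (h0 : 0 ≤ i) (h1 : i < t.length) :
    (pvSufKey t i).length = t.length - i.toNat := by
  simp [pvSufKey, PySem.List.slice_from t h0]

theorem pvSufKey_lt {t : List Char} {i j : Int} (hi0 : 0 ≤ i) (hi1 : i < t.length)
    (hj0 : 0 ≤ j) (hj1 : j < t.length) (hne : i ≠ j) (hle : pvSufKey t i ≤ pvSufKey t j) :
    pvSufKey t i < pvSufKey t j := by
  refine lt_of_le_of_ne hle (fun he => hne ?_)
  have hl := congrArg List.length he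
  rw [pvSufKey_length hi0 hi1, pvSufKey_length hj0 hj1] at hl
  omega

theorem pvSorted_pairs (t : List Char) :
    PySem.List.sorted ((PySem.List.pyRange 0 (PySem.List.len t) 1).map
        (fun i => (PySem.List.slice t (some i) none, i))) (fun p => toLex p)
      = (pvSA t).map (fun i => (pvSufKey t i, i)) := by
  apply pvSorted_eq_of_perm_of_pairwise_lt
  · exact (pvSA_perm t).map _
  · rw [List.pairwise_map]
    have hpw : (pvSA t).Pairwise (fun a b => pvSufKey t a ≤ pvSufKey t b) :=
      pvSorted_pairwise _ _ _
    have hnd : (pvSA t).Pairwise (· ≠ ·) := pvSA_nodup t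
    refine (List.Pairwise.and hpw hnd).imp_of_mem ?_
    intro a b ha hb hab
    have hm1 := pvSA_mem ha
    have hm2 := pvSA_mem hb
    exact Prod.Lex.lt_iff.2 (Or.inl (pvSufKey_lt hm1.1 hm1.2 hm2.1 hm2.2 hab.2 hab.1))

theorem pvBuildBWT_eq (xs : List Char) :
    pvBuildBWT xs = (pvBW (xs ++ ['$']), pvSA (xs ++ ['$'])) := by
  unfold pvBuildBWT
  dsimp only
  rw [pvSorted_pairs (xs ++ ['$'])]
  refine Prod.ext ?_ ?_
  · show (((pvSA (xs ++ ['$'])).map (fun i => (pvSufKey (xs ++ ['$']) i, i))).map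
        (fun p => if p.2 > 0 then PySem.List.pyGetD (xs ++ ['$']) (p.2 - 1) '$' else '$')) = _
    rw [List.map_map]
    refine List.map_congr_left ?_
    intro i hi
    have h1 := pvSA_mem hi
    simp only [Function.comp]
    by_cases h : i > 0
    · simp [h]
    · have : i = 0 := by omega
      subst this
      simp [PySem.List.pyGetD_neg_one_append_singleton]
  · show (((pvSA (xs ++ ['$'])).map (fun i => (pvSufKey (xs ++ ['$']) i, i))).map (fun p => p.2)) = _
    rw [List.map_map]
    have h : ((fun p : List Char × Int => p.2) ∘ fun i => (pvSufKey (xs ++ ['$']) i, i)) = id := rfl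
    rw [h, List.map_id]

theorem pvBW_perm (xs : List Char) : (pvBW (xs ++ ['$'])).Perm (xs ++ ['$']) := by
  set t := xs ++ ['$'] with ht
  have hn : 0 < (PySem.List.len t) := by
    simp [PySem.List.len_eq, ht]
  have hmap : (PySem.List.pyRange 0 (PySem.List.len t) 1).map
      (fun i => PySem.List.pyGetD t (i - 1) '$') = '$' :: xs := by
    rw [PySem.List.pyRange_one_cons hn, List.map_cons]
    congr 1
    · have h0 : (0 : Int) - 1 = -1 := by norm_num
      rw [h0, ht]
      exact PySem.List.pyGetD_neg_one_append_singleton xs '$' '$'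
    · apply List.ext_getElem
      · simp [PySem.List.length_pyRange_one, PySem.List.len_eq, ht]
      · intro k hk1 hk2
        rw [List.getElem_map, PySem.List.getElem_pyRange_one]
        have h1 : (0 : Int) + 1 + (k : Int) - 1 = ((k : Nat) : Int) := by ring
        rw [h1, PySem.List.pyGetD_natCast]
        have hkx : k < xs.length := hk2
        have hkt : k < t.length := by
          simp only [ht, List.length_append, List.length_singleton]; omega
        rw [List.getD_eq_getElem _ _ hkt]
        simp only [ht]
        exact List.getElem_append_left hkx
  have hperm : (pvBW t).Perm ('$' :: xs) := by
    rw [pvBW, ← hmap]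
    exact (pvSA_perm t).map _
  exact hperm.trans (List.perm_append_singleton '$' xs).symm

theorem pv_countP_lt_add_count_le (l : List Char) (c : Char) :
    l.countP (fun x => decide (x < c)) + l.count c ≤ l.length := by
  induction l with
  | nil => simp
  | cons x l ih =>
    simp only [List.countP_cons, List.count_cons, List.length_cons, beq_iff_eq]
    by_cases h : x = c
    · subst h
      simp only [lt_irrefl, decide_false]
      norm_num
      omega
    · simp only [h, if_false]
      by_cases h2 : x < c <;> simp only [h2, decide_true, decide_false] <;> norm_num <;> omega

theorem pvRowFold (c : Char) (l : List Char) :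
    l.foldl
        (fun (p : List Int × Int) x =>
          let cnt := if x = c then p.2 + 1 else p.2
          (p.1 ++ [cnt], cnt)) ([0], 0)
      = ((List.range (l.length + 1)).map (fun k => ((l.take k).count c : Int)),
          (l.count c : Int)) := by
  induction l using List.reverseRecOn with
  | nil => simp
  | append_singleton l x ih =>
    rw [List.foldl_append, ih, List.foldl_cons, List.foldl_nil]
    have hcnt : (if x = c then (l.count c : Int) + 1 else (l.count c : Int))
        = ((l ++ [x]).count c : Int) := by
      rw [List.count_append]
      by_cases hx : x = c
      · subst hx; simp [List.count_singleton]
      · have hbeq : (x == c) = false := beq_eq_false_iff_ne.mpr hx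
        simp [hx, List.count_singleton, hbeq]
    dsimp only
    rw [hcnt]
    congr 1
    have hlen : (l ++ [x]).length + 1 = (l.length + 1) + 1 := by simp
    conv_rhs => rw [hlen, List.range_succ, List.map_append]
    congr 1
    · refine List.map_congr_left ?_
      intro k hk
      rw [List.mem_range] at hk
      congr 2
      exact (List.take_append_of_le_length (by omega)).symm
    · rw [List.map_singleton]
      congr 1
      have htk : (l ++ [x]).take (l.length + 1) = l ++ [x] := by
        apply List.take_of_length_le
        simp
      rw [htk]

theorem pvAltRow_spec (bwt : List Char) (c : Char) :
    pvAltRow bwt c = (List.range (bwt.length + 1)).map (fun k => pvOccN bwt c k) := by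
  rw [pvAltRow, pvRowFold]
  rfl

theorem pvRow_getD (bwt : List Char) (c : Char) (pos : Int) (h0 : 0 ≤ pos)
    (h1 : pos ≤ (bwt.length : Int)) :
    PySem.List.pyGetD (pvAltRow bwt c) pos 0 = pvOccN bwt c pos.toNat := by
  have hpos : pos = ((pos.toNat : Nat) : Int) := by omega
  conv_lhs => rw [hpos]
  rw [PySem.List.pyGetD_natCast, pvAltRow_spec,
    List.getD_eq_getElem _ _ (by simp; omega), List.getElem_map, List.getElem_range]

theorem pvAltRanks_items (bwt : List Char) :
    (pvAltRanks bwt).items = (PySem.Set.ofList bwt).map (fun c => (c, pvAltRow bwt c)) := by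
  rw [pvAltRanks]
  have h := PySem.Dict.items_foldl_insert_fresh (PySem.Set.ofList bwt) (fun c => c)
    (fun c => pvAltRow bwt c) PySem.Dict.empty
    (by intro a _; rfl) (by simpa using PySem.Set.nodup_ofList bwt)
  simpa using h

theorem pvAltRanks_getD {bwt : List Char} {c : Char} (h : c ∈ bwt) :
    (pvAltRanks bwt).getD c [] = pvAltRow bwt c := by
  refine PySem.Dict.getD_of_mem_items _ ?_ ?_ []
  · rw [pvAltRanks_items]
    exact List.mem_map_of_mem ((PySem.Set.mem_ofList bwt c).2 h)
  · have hk := congrArg (List.map Prod.fst) (pvAltRanks_items bwt)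
    simp only [List.map_map] at hk
    have hid : (Prod.fst ∘ fun c => (c, pvAltRow bwt c)) = id := rfl
    rw [hid, List.map_id] at hk
    have : (pvAltRanks bwt).keys = PySem.Set.ofList bwt := hk
    rw [PySem.Dict.keys] at this ⊢
    rw [this]
    exact PySem.Set.nodup_ofList bwt

theorem pvAltFirst_items (bwt : List Char) :
    (pvAltFirst bwt).items = (PySem.Set.ofList bwt).map
      (fun c => (c, (bwt.countP (fun x => decide (x < c)) : Int))) := by
  rw [pvAltFirst]
  have h := PySem.Dict.items_foldl_insert_fresh (PySem.Set.ofList bwt) (fun c => c)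
    (fun c => (bwt.countP (fun x => decide (x < c)) : Int)) PySem.Dict.empty
    (by intro a _; rfl) (by simpa using PySem.Set.nodup_ofList bwt)
  simpa using h

theorem pvAltFirst_keys (bwt : List Char) : (pvAltFirst bwt).keys = PySem.Set.ofList bwt := by
  simp only [PySem.Dict.keys, pvAltFirst_items bwt, List.map_map]
  have h : ((fun p : Char × Int => p.1) ∘ fun c => (c, (bwt.countP (fun x => decide (x < c)) : Int))) = id := rfl
  rw [h, List.map_id]

theorem pvAltFirst_getD {bwt : List Char} {c : Char} (h : c ∈ bwt) :
    (pvAltFirst bwt).getD c 0 = pvCntLt bwt c := by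
  refine PySem.Dict.getD_of_mem_items _ ?_ ?_ 0
  · rw [pvAltFirst_items]
    exact List.mem_map_of_mem ((PySem.Set.mem_ofList bwt c).2 h)
  · rw [pvAltFirst_keys]
    exact PySem.Set.nodup_ofList bwt

theorem pvAltFirst_contains (bwt : List Char) (c : Char) :
    (pvAltFirst bwt).contains c = decide (c ∈ bwt) := by
  by_cases h : c ∈ bwt
  · have hk : c ∈ (pvAltFirst bwt).keys := by
      rw [pvAltFirst_keys]; exact (PySem.Set.mem_ofList bwt c).2 h
    simp [h, (PySem.Dict.contains_iff_mem_keys _ _).2 hk]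
  · have hk : ¬ (pvAltFirst bwt).contains c = true := fun hc =>
      h ((PySem.Set.mem_ofList bwt c).1
        (by rw [← pvAltFirst_keys bwt]; exact (PySem.Dict.contains_iff_mem_keys _ _).1 hc))
    have hx : (pvAltFirst bwt).contains c = false := by simpa using hk
    simp [h, hx]

theorem pvFO_fold (F : List Char) (s : Int) (d : PySem.Dict Char Int) (c : Char) :
    ((PySem.List.enumerate F s).foldl
        (fun d p => if d.contains p.2 then d else d.insert p.2 p.1) d).get? c
      = (d.get? c).or (Option.map (fun k : Nat => s + (k : Int)) (PySem.List.index? F c)) := by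
  induction F generalizing s d with
  | nil =>
    simp [PySem.List.enumerate_nil]
  | cons x F ih =>
    rw [PySem.List.enumerate_cons, List.foldl_cons]
    dsimp only
    by_cases hx : d.contains x
    · rw [if_pos hx, ih]
      by_cases hxc : x = c
      · subst hxc
        have hs : (d.get? x).isSome := by rw [← PySem.Dict.contains_eq_isSome_get?]; exact hx
        obtain ⟨v, hv⟩ := Option.isSome_iff_exists.1 hs
        simp [hv]
      · rw [PySem.List.index?_cons_of_ne _ hxc, Option.map_map]
        congr 2
        funext k
        simp only [Function.comp]
        push_cast
        ring
    · rw [if_neg hx, ih]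
      by_cases hxc : x = c
      · subst hxc
        have hn : d.get? x = none := (PySem.Dict.get?_eq_none_iff_contains d x).2
          (Bool.not_eq_true _ ▸ by simpa using hx)
        rw [PySem.Dict.get?_insert_self, hn, PySem.List.index?_cons_self]
        simp
      · rw [PySem.Dict.get?_insert_of_ne _ _ (Ne.symm hxc), PySem.List.index?_cons_of_ne _ hxc,
          Option.map_map]
        congr 2
        funext k
        simp only [Function.comp]
        push_cast
        ring

theorem pvIndex_sorted (F : List Char) (hpw : F.Pairwise (· ≤ ·)) {c : Char} (hc : c ∈ F) :
    PySem.List.index? F c = some (F.countP (fun x => decide (x < c))) := by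
  induction F with
  | nil => cases hc
  | cons x F ih =>
    rw [List.pairwise_cons] at hpw
    by_cases hxc : x = c
    · subst hxc
      rw [PySem.List.index?_cons_self, List.countP_cons]
      have hz : F.countP (fun x_1 => decide (x_1 < x)) = 0 := by
        rw [List.countP_eq_zero]
        intro y hy
        simpa using not_lt_of_ge (hpw.1 y hy)
      simp [hz]
    · have hcF : c ∈ F := by cases hc with
        | head => exact absurd rfl hxc
        | tail _ h => exact h
      rw [PySem.List.index?_cons_of_ne _ hxc, ih hpw.2 hcF, List.countP_cons]
      have hxltc : x < c := lt_of_le_of_ne (hpw.1 c hcF) hxc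
      simp [hxltc]

theorem pvFO_getD {bwt : List Char} {c : Char} (h : c ∈ bwt) :
    (pvBuildFirstOccurrence bwt).getD c 0 = pvCntLt bwt c := by
  rw [pvBuildFirstOccurrence]
  have hmem : c ∈ PySem.List.sorted bwt (fun c => c) :=
    (PySem.List.mem_sorted _ _ _ _).2 h
  have hpw : (PySem.List.sorted bwt (fun c : Char => c)).Pairwise (· ≤ ·) :=
    pvSorted_pairwise _ _ _
  rw [PySem.Dict.getD_eq_get?_getD, pvFO_fold, PySem.Dict.get?_empty, Option.none_or,
    pvIndex_sorted _ hpw hmem]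
  have hcp : (PySem.List.sorted bwt (fun c : Char => c)).countP (fun x => decide (x < c))
      = bwt.countP (fun x => decide (x < c)) :=
    (PySem.List.sorted_perm bwt (fun c => c) false).countP_eq _
  simp [hcp, pvCntLt]

theorem pvSlice_contains_iff (bwt : List Char) (c : Char) (top bot : Int)
    (h0 : 0 ≤ top) (h1 : top ≤ bot) (h2 : bot ≤ (bwt.length : Int)) :
    (PySem.List.slice bwt (some top) (some bot)).contains c = true ↔
      pvOccN bwt c top.toNat < pvOccN bwt c bot.toNat := by
  have hb0 : 0 ≤ bot := le_trans h0 h1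
  rw [PySem.List.slice_toNat _ h0 hb0]
  have hab : top.toNat ≤ bot.toNat := by omega
  have hsplit : bwt.take bot.toNat
      = bwt.take top.toNat ++ (bwt.drop top.toNat).take (bot.toNat - top.toNat) := by
    rw [← List.take_add]
    congr 1
    omega
  rw [List.contains_iff_mem, ← List.count_pos_iff]
  unfold pvOccN
  rw [hsplit, List.count_append]
  omega

-- characterization of A's checkpoint-array build loop
def pvCkpBody (bwt : List Char) :
    PySem.Dict Char (List Int) × PySem.Dict Char Int → Int →
      PySem.Dict Char (List Int) × PySem.Dict Char Int := fun p i =>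
  let p1 := if PySem.Int.mod i 100 = 0 then
      (p.2.keys.foldl (fun cnts c => cnts.insert c (cnts.getD c [] ++ [p.2.getD c 0])) p.1, p.2)
    else p
  (p1.1, p1.2.modify (PySem.List.pyGetD bwt i ' ') 0 (· + 1))

def pvCkpInit : PySem.Dict Char (List Int) × PySem.Dict Char Int → List Char →
    PySem.Dict Char (List Int) × PySem.Dict Char Int := fun st K =>
  K.foldl (fun p c => (p.1.insert c [], p.2.insert c 0)) st

def pvCkpSt (bwt : List Char) (m : Nat) : PySem.Dict Char (List Int) × PySem.Dict Char Int :=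
  (PySem.List.pyRange 0 (m : Int) 1).foldl (pvCkpBody bwt)
    (pvCkpInit (PySem.Dict.empty, PySem.Dict.empty) (PySem.Set.ofList bwt))

def pvNumCk (m : Nat) : Nat := (m + 99) / 100

theorem pvCkp_eq_st (bwt : List Char) :
    pvBuildCheckpointArrays bwt 100 = pvCkpSt bwt bwt.length := by
  unfold pvBuildCheckpointArrays pvCkpSt pvCkpInit pvCkpBody
  rw [PySem.List.len_eq]

theorem pvPairFold (K : List Char) (d1 : PySem.Dict Char (List Int)) (d2 : PySem.Dict Char Int) :
    K.foldl (fun p c => (p.1.insert c [], p.2.insert c 0)) (d1, d2)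
      = (K.foldl (fun d c => d.insert c []) d1, K.foldl (fun d c => d.insert c 0) d2) := by
  induction K generalizing d1 d2 with
  | nil => rfl
  | cons x K ih => simp [List.foldl_cons, ih]

theorem pvGetD_foldl_insert_const {ν : Type} (K : List Char) (v : ν) (d : PySem.Dict Char ν)
    (c : Char) (dflt : ν) :
    (K.foldl (fun d x => d.insert x v) d).getD c dflt
      = if c ∈ K then v else d.getD c dflt := by
  induction K generalizing d with
  | nil => simp
  | cons x K ih =>
    rw [List.foldl_cons, ih]
    by_cases hc : c ∈ K
    · simp [hc]
    · by_cases hx : c = x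
      · subst hx
        simp [hc, PySem.Dict.getD_insert_self]
      · simp [hc, hx, PySem.Dict.getD_insert_of_ne _ _ _ hx]

theorem pvSnapGetD (K : List Char) (hK : K.Nodup) (d : PySem.Dict Char (List Int))
    (tot : PySem.Dict Char Int) (c : Char) :
    (K.foldl (fun cnts ch => cnts.insert ch (cnts.getD ch [] ++ [tot.getD ch 0])) d).getD c []
      = if c ∈ K then d.getD c [] ++ [tot.getD c 0] else d.getD c [] := by
  induction K generalizing d with
  | nil => simp
  | cons x K ih =>
    rw [List.nodup_cons] at hK
    rw [List.foldl_cons, ih hK.2]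
    by_cases hx : c = x
    · subst hx
      simp [hK.1, PySem.Dict.getD_insert_self]
    · rw [PySem.Dict.getD_insert_of_ne _ _ _ hx]
      simp [hx]

theorem pvCkpInv (bwt : List Char) (m : Nat) (hm : m ≤ bwt.length) :
    (∀ c, (pvCkpSt bwt m).2.getD c 0 = ((bwt.take m).count c : Int)) ∧
    ((pvCkpSt bwt m).2.keys = PySem.Set.ofList bwt) ∧
    (∀ c, (pvCkpSt bwt m).1.getD c []
      = if c ∈ bwt then (List.range (pvNumCk m)).map
          (fun k => ((bwt.take (100 * k)).count c : Int)) else []) := by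
  induction m with
  | zero =>
    have hst : pvCkpSt bwt 0 = pvCkpInit (PySem.Dict.empty, PySem.Dict.empty) (PySem.Set.ofList bwt) := by
      rw [pvCkpSt]
      norm_num [PySem.List.pyRange_one_eq_nil]
    rw [hst, pvCkpInit, pvPairFold]
    refine ⟨?_, ?_, ?_⟩
    · intro c
      rw [pvGetD_foldl_insert_const]
      split <;> simp
    · rw [PySem.Dict.keys_foldl_insert (f := fun _ _ => (0 : Int)), PySem.Dict.keys_empty,
        PySem.Set.update_nil_left, PySem.Set.ofList_ofList]
    · intro c
      rw [pvGetD_foldl_insert_const]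
      have : pvNumCk 0 = 0 := by rfl
      split <;> simp [this]
  | succ m ih =>
    have hm' : m ≤ bwt.length := by omega
    have hmn : m < bwt.length := by omega
    obtain ⟨ih1, ih2, ih3⟩ := ih hm'
    have hstep : pvCkpSt bwt (m + 1) = pvCkpBody bwt (pvCkpSt bwt m) (m : Int) := by
      rw [pvCkpSt, pvCkpSt]
      have hc : (((m + 1 : Nat)) : Int) = (m : Int) + 1 := by push_cast; ring
      rw [hc, PySem.List.pyRange_one_succ_right (by positivity), List.foldl_append, List.foldl_cons,
        List.foldl_nil]
    have hget : PySem.List.pyGetD bwt (m : Int) ' ' = bwt[m] := by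
      rw [PySem.List.pyGetD_eq_getElem _ _ (by positivity) (by exact_mod_cast hmn)]
      simp
    have htake : bwt.take (m + 1) = bwt.take m ++ [bwt[m]] := by
      rw [List.take_add_one]
      congr 1
      rw [List.getElem?_eq_getElem hmn]
      rfl
    have hmod : PySem.Int.mod (m : Int) 100 = ((m % 100 : Nat) : Int) := PySem.Int.mod_natCast m 100
    rw [hstep]
    unfold pvCkpBody
    dsimp only
    by_cases hdiv : m % 100 = 0
    · have hcond : PySem.Int.mod (m : Int) 100 = 0 := by rw [hmod, hdiv]; rfl
      rw [if_pos hcond]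
      dsimp only
      refine ⟨?_, ?_, ?_⟩
      · intro c
        rw [PySem.Dict.getD_modify, hget, htake, List.count_append]
        by_cases hcx : c = bwt[m]
        · subst hcx
          simp [ih1, List.count_singleton]
        · have hbeq : (bwt[m] == c) = false := beq_eq_false_iff_ne.mpr (fun h => hcx h.symm)
          simp [hcx, ih1, List.count_singleton, hbeq]
      · rw [PySem.Dict.keys_modify, PySem.Dict.keys_insert_of_contains, ih2]
        rw [PySem.Dict.contains_iff_mem_keys, ih2, hget, PySem.Set.mem_ofList]
        exact List.getElem_mem hmn
      · intro c
        rw [ih2, pvSnapGetD _ (PySem.Set.nodup_ofList bwt), ih3, ih1]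
        simp only [PySem.Set.mem_ofList]
        by_cases hcb : c ∈ bwt
        · have hnum : pvNumCk (m + 1) = pvNumCk m + 1 := by unfold pvNumCk; omega
          have hmq : 100 * pvNumCk m = m := by unfold pvNumCk; omega
          simp only [hcb, if_pos, if_true]
          rw [hnum, List.range_succ, List.map_append, List.map_cons, List.map_nil, hmq]
        · simp [hcb]
    · have hcond : ¬ PySem.Int.mod (m : Int) 100 = 0 := by
        rw [hmod]
        exact_mod_cast fun h => hdiv (by exact_mod_cast h)
      rw [if_neg hcond]
      refine ⟨?_, ?_, ?_⟩
      · intro c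
        rw [PySem.Dict.getD_modify, hget, htake, List.count_append]
        by_cases hcx : c = bwt[m]
        · subst hcx
          simp [ih1, List.count_singleton]
        · have hbeq : (bwt[m] == c) = false := beq_eq_false_iff_ne.mpr (fun h => hcx h.symm)
          simp [hcx, ih1, List.count_singleton, hbeq]
      · rw [PySem.Dict.keys_modify, PySem.Dict.keys_insert_of_contains, ih2]
        rw [PySem.Dict.contains_iff_mem_keys, ih2, hget, PySem.Set.mem_ofList]
        exact List.getElem_mem hmn
      · intro c
        have hnum : pvNumCk (m + 1) = pvNumCk m := by unfold pvNumCk; omega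
        rw [hnum]
        exact ih3 c

theorem pvScan (bwt : List Char) (c : Char) (a b : Nat) (hab : a ≤ b) (hb : b ≤ bwt.length)
    (k : Int) :
    (PySem.List.pyRange (a : Int) (b : Int) 1).foldl
        (fun cnt i => if PySem.List.pyGetD bwt i ' ' = c then cnt + 1 else cnt) k
      = k + (((bwt.take b).drop a).count c : Int) := by
  induction b, hab using Nat.le_induction with
  | base =>
    rw [PySem.List.pyRange_one_eq_nil (le_refl _), List.foldl_nil]
    simp
  | succ b hab ih =>
    have hb' : b ≤ bwt.length := by omega
    have hbn : b < bwt.length := by omega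
    have hc : (((b + 1 : Nat)) : Int) = (b : Int) + 1 := by push_cast; ring
    rw [hc, PySem.List.pyRange_one_succ_right (by exact_mod_cast hab), List.foldl_append,
      List.foldl_cons, List.foldl_nil, ih hb']
    have hget : PySem.List.pyGetD bwt (b : Int) ' ' = bwt[b] := by
      rw [PySem.List.pyGetD_eq_getElem _ _ (by positivity) (by exact_mod_cast hbn)]
      simp
    have htake : bwt.take (b + 1) = bwt.take b ++ [bwt[b]] := by
      rw [List.take_add_one]
      congr 1
      rw [List.getElem?_eq_getElem hbn]
      rfl
    have hlen : (bwt.take b).length = b := by simp [hb']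
    rw [hget, htake, List.drop_append_of_le_length (by omega), List.count_append]
    by_cases hcx : bwt[b] = c
    · simp [hcx, List.count_singleton]
      ring
    · have : (bwt[b] == c) = false := by simpa using hcx
      simp [hcx, List.count_singleton, this]

theorem pvCountSymbol_eq {bwt : List Char} {c : Char} (hc : c ∈ bwt) (pos : Int)
    (h0 : 0 ≤ pos) (h1 : pos.toNat ≤ bwt.length)
    (h2 : pos.toNat < bwt.length ∨ bwt.length % 100 ≠ 0) :
    pvCountSymbol bwt c pos 100 (pvBuildCheckpointArrays bwt 100).1 = pvOccN bwt c pos.toNat := by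
  have hb : bwt.length ≠ 0 := by
    intro h
    exact (List.ne_nil_of_mem hc) (List.eq_nil_of_length_eq_zero h)
  set P := pos.toNat with hP
  have hpos : pos = (P : Int) := by omega
  have hinv := pvCkpInv bwt bwt.length (le_refl _)
  have hnum : pvNumCk bwt.length = (bwt.length - 1) / 100 + 1 := by unfold pvNumCk; omega
  have hchk : (pvBuildCheckpointArrays bwt 100).1.getD c []
      = (List.range ((bwt.length - 1) / 100 + 1)).map
          (fun k => ((bwt.take (100 * k)).count c : Int)) := by
    rw [pvCkp_eq_st, (hinv.2.2 c), if_pos hc, hnum]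
  set q := P / 100 with hq
  have hqL : q < (bwt.length - 1) / 100 + 1 := by omega
  rw [pvCountSymbol]
  have hfd : PySem.Int.floordiv ((P : Nat) : Int) 100 = ((P / 100 : Nat) : Int) := by
    exact_mod_cast PySem.Int.floordiv_natCast P 100
  rw [hpos, hfd, hchk, PySem.List.pyGetD_natCast]
  rw [List.getD_eq_getElem _ _ (by simpa using hqL), List.getElem_map, List.getElem_range]
  have hstart : ((q : Nat) : Int) * 100 = ((q * 100 : Nat) : Int) := by push_cast; ring
  rw [hstart, pvScan bwt c (q * 100) P (by omega) h1]
  have hsplit : (bwt.take P).count c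
      = (bwt.take (100 * q)).count c + (((bwt.take P).drop (q * 100)).count c) := by
    have h100 : bwt.take (100 * q) = (bwt.take P).take (q * 100) := by
      rw [List.take_take]
      congr 1
      omega
    rw [h100, ← List.count_append, List.take_append_drop]
  rw [pvOccN]
  simp only [← hq]
  push_cast
  omega

theorem pvMatch_eq (bwt : List Char) (rev : List Char) (top bot : Int)
    (h0 : 0 ≤ top) (h1 : top < bot) (h2 : bot ≤ (bwt.length : Int))
    (hp : bwt.length % 100 = 0 → ∀ c, rev.head? = some c → c ∉ bwt) :
    pvBetterBWMatching bwt (pvBuildFirstOccurrence bwt) 100 (pvBuildCheckpointArrays bwt 100).1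
        rev.reverse top (bot - 1)
      = PySem.List.pyRange (pvAltLoop (pvAltFirst bwt) (pvAltRanks bwt) rev top bot).1
          (pvAltLoop (pvAltFirst bwt) (pvAltRanks bwt) rev top bot).2 1 := by
  induction rev generalizing top bot with
  | nil =>
    rw [pvAltLoop, List.reverse_nil, pvBetterBWMatching, if_pos (by omega : top ≤ bot - 1),
      dif_pos rfl]
    congr 1
    omega
  | cons c rest ih =>
    rw [pvAltLoop, List.reverse_cons, pvBetterBWMatching, if_pos (by omega : top ≤ bot - 1),
      dif_neg (by simp : ¬ rest.reverse ++ [c] = [])]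
    have hbb : bot - 1 + 1 = bot := by ring
    have hlast : (rest.reverse ++ [c]).getLast (by simp) = c := by
      rw [List.getLast_append_singleton]
    have hdrop : (rest.reverse ++ [c]).dropLast = rest.reverse := List.dropLast_concat ..
    by_cases hcb : c ∈ bwt
    · have hn100 : bwt.length % 100 ≠ 0 := fun h => (hp h c rfl) hcb
      have hcont : (pvAltFirst bwt).contains c = true := by
        rw [pvAltFirst_contains]; simp [hcb]
      rw [if_pos hcont]
      simp only [hlast, hdrop, hbb]
      have hrow : (pvAltRanks bwt).getD c [] = pvAltRow bwt c := pvAltRanks_getD hcb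
      have hT : PySem.List.pyGetD (pvAltRow bwt c) top 0 = pvOccN bwt c top.toNat :=
        pvRow_getD bwt c top h0 (by omega)
      have hB : PySem.List.pyGetD (pvAltRow bwt c) bot 0 = pvOccN bwt c bot.toNat :=
        pvRow_getD bwt c bot (by omega) h2
      have hCT : pvCountSymbol bwt c top 100 (pvBuildCheckpointArrays bwt 100).1
          = pvOccN bwt c top.toNat :=
        pvCountSymbol_eq hcb top h0 (by omega) (by omega)
      have hCB : pvCountSymbol bwt c bot 100 (pvBuildCheckpointArrays bwt 100).1
          = pvOccN bwt c bot.toNat :=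
        pvCountSymbol_eq hcb bot (by omega) (by omega) (Or.inr hn100)
      have hFO : (pvBuildFirstOccurrence bwt).getD c 0 = pvCntLt bwt c := pvFO_getD hcb
      have hF : (pvAltFirst bwt).getD c 0 = pvCntLt bwt c := pvAltFirst_getD hcb
      have hoccT0 : (0 : Int) ≤ pvOccN bwt c top.toNat := by unfold pvOccN; positivity
      have hoccTB : pvOccN bwt c top.toNat ≤ pvOccN bwt c bot.toNat := by
        unfold pvOccN
        have hsp : bwt.take bot.toNat
            = bwt.take top.toNat ++ (bwt.drop top.toNat).take (bot.toNat - top.toNat) := by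
          rw [← List.take_add]
          congr 1
          omega
        rw [hsp, List.count_append]
        push_cast
        omega
      have hcnt0 : (0 : Int) ≤ pvCntLt bwt c := by unfold pvCntLt; positivity
      have hbound : pvCntLt bwt c + pvOccN bwt c bot.toNat ≤ (bwt.length : Int) := by
        have hc1 : bwt.count c = (bwt.take bot.toNat).count c + (bwt.drop bot.toNat).count c := by
          rw [← List.count_append, List.take_append_drop]
        have hc2 := pv_countP_lt_add_count_le bwt c
        unfold pvCntLt pvOccN
        push_cast
        omega
      by_cases hm : pvOccN bwt c top.toNat < pvOccN bwt c bot.toNat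
      · rw [if_pos ((pvSlice_contains_iff bwt c top bot h0 (le_of_lt h1) h2).2 hm), hCT, hCB,
          hFO, hF, hrow, hT, hB]
        rw [if_neg (by omega : ¬ pvCntLt bwt c + pvOccN bwt c bot.toNat
            ≤ pvCntLt bwt c + pvOccN bwt c top.toNat)]
        exact ih (pvCntLt bwt c + pvOccN bwt c top.toNat)
          (pvCntLt bwt c + pvOccN bwt c bot.toNat)
          (by omega) (by omega) (by omega) (fun h => absurd h hn100)
      · rw [if_neg (fun hmem => hm ((pvSlice_contains_iff bwt c top bot h0 (le_of_lt h1) h2).1 hmem))]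
        rw [hF, hrow, hT, hB, if_pos (by omega : pvCntLt bwt c + pvOccN bwt c bot.toNat
            ≤ pvCntLt bwt c + pvOccN bwt c top.toNat)]
        rw [PySem.List.pyRange_one_eq_nil (by omega)]
    · have hcont : (pvAltFirst bwt).contains c = false := by
        rw [pvAltFirst_contains]; simp [hcb]
      rw [if_neg (by simp [hcont] : ¬ (pvAltFirst bwt).contains c = true)]
      have hmem : ¬ (PySem.List.slice bwt (some top) (some (bot - 1 + 1))).contains c = true := by
        intro hmm
        exact hcb (PySem.List.mem_of_mem_slice bwt (some top) (some (bot - 1 + 1)) (List.contains_iff_mem.1 hmm))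
      simp only [hlast]
      rw [if_neg hmem]
      rw [PySem.List.pyRange_one_eq_nil (le_refl 0)]

-- ===== VERDICT (by name: the statement is the Claim_ definition above) =====
theorem pvLenBW (t : List Char) : PySem.List.len (pvBW t) = PySem.List.len t := by
  simp [PySem.List.len_eq, pvBW_length]

theorem MultiplePatternMatching_spec : Claim_equal_MultiplePatternMatching := by
  intro text patterns _hdom hpre
  show MultiplePatternMatching text patterns = MultiplePatternMatching_alt text patterns
  unfold MultiplePatternMatching MultiplePatternMatching_alt
  dsimp only
  rw [pvBuildBWT_eq text.toList]
  dsimp only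
  set t := text.toList ++ ['$'] with ht
  have hsa : PySem.List.sorted (PySem.List.pyRange 0 (PySem.List.len t) 1)
      (fun i => PySem.List.slice t (some i) none) = pvSA t := rfl
  rw [hsa]
  have hbw : (pvSA t).map (fun i => PySem.List.pyGetD t (i - 1) '$') = pvBW t := rfl
  rw [hbw]
  have hfst : ((PySem.Set.ofList (pvBW t)).foldl
      (fun (d : PySem.Dict Char Int) c =>
        d.insert c (((pvBW t).countP (fun x => decide (x < c)) : Int)))
      PySem.Dict.empty) = pvAltFirst (pvBW t) := rfl
  rw [hfst]
  have hrk : ((PySem.Set.ofList (pvBW t)).foldl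
      (fun (d : PySem.Dict Char (List Int)) c =>
        d.insert c ((pvBW t).foldl
          (fun (p : List Int × Int) x =>
            let cnt := if x = c then p.2 + 1 else p.2
            (p.1 ++ [cnt], cnt)) ([0], 0)).1)
      PySem.Dict.empty) = pvAltRanks (pvBW t) := rfl
  rw [hrk]
  congr 1
  apply PySem.List.foldl_congr_mem
  intro acc p hp
  congr 1
  have hlen : (1 : Int) ≤ PySem.List.len t := by
    simp [PySem.List.len_eq, ht]
  have hmp : pvBetterBWMatching (pvBW t) (pvBuildFirstOccurrence (pvBW t)) 100
      (pvBuildCheckpointArrays (pvBW t) 100).1 p.toList 0 (PySem.List.len (pvBW t) - 1)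
      = PySem.List.pyRange (pvAltLoop (pvAltFirst (pvBW t)) (pvAltRanks (pvBW t)) p.toList.reverse 0
          (PySem.List.len t)).1
          (pvAltLoop (pvAltFirst (pvBW t)) (pvAltRanks (pvBW t)) p.toList.reverse 0 (PySem.List.len t)).2 1 := by
    rw [pvLenBW]
    conv_lhs => rw [← List.reverse_reverse p.toList]
    exact pvMatch_eq (pvBW t) p.toList.reverse 0 (PySem.List.len t)
      (le_refl 0) (by omega) (by simp [PySem.List.len_eq, pvBW_length])
      (by
        intro hmod c hhead hcbw
        have hct : c ∈ t := ((pvBW_perm text.toList).mem_iff).1 hcbw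
        have hlast : p.toList.getLast? = some c := by
          rw [← List.head?_reverse]
          exact hhead
        have hmod' : (text.toList.length + 1) % 100 = 0 := by
          have h2 : (pvBW t).length = text.toList.length + 1 := by
            rw [pvBW_length]
            simp [ht]
          omega
        exact (hpre hmod' p hp c hlast) hct)
  rw [hmp]
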